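-- pv_equiv track=rewrite | github.com/pypi-data/pypi-mirror-11 | packages/p4util/p4util-0.0.1-py2.py3-none-any.whl/p4util/log/filter.py | gen_log_entries
-- ===== SOURCE A (Python) =====
-- def gen_log_entries(lines):
--     e = []
--     for l in lines:
--         if l.startswith('Perforce server ') and l.endswith(':'):
--             if e:
--                 yield e
--             e = []
--         e.append(l)
--     yield e                     # end of file
-- ===== SOURCE B (Python) =====
-- def gen_log_entries(lines):
--     # Staged cut-point approach: repeatedly find the next header line (searching
--     # from index 1 so a header at index 0 stays in the leading entry), emit the
--     # slice before it, and continue on the rest.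
--     seg = list(lines)
--     while True:
--         nxt = next((i for i in range(1, len(seg))
--                     if seg[i].startswith('Perforce server ') and seg[i].endswith(':')), None)
--         if nxt is None:
--             yield seg
--             return
--         yield seg[:nxt]
--         seg = seg[nxt:]
-- ===== Notes on version B (the rewrite author's own statement) =====
-- stated objective: alternative
-- what changed: B replaces A's element-wise forward scan with a mutable current-entry accumulator by a staged cut-point algorithm: repeatedly find the index of the next header line (searching from index 1) and emit the slice up to it, then continue on the remaining suffix.
import Mathlib
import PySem

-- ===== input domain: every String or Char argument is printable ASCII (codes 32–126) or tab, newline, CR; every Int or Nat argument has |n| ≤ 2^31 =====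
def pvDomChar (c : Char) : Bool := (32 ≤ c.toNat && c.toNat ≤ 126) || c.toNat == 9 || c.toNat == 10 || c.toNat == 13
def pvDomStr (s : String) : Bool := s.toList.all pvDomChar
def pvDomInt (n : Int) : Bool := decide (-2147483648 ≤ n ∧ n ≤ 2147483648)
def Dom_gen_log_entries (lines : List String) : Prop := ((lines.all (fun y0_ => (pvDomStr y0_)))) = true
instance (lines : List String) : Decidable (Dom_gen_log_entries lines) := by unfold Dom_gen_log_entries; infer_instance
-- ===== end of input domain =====

-- B groups the lines into the same entries by repeatedly finding the next header line
-- (searched from index 1) and slicing the list there, instead of A's element-wise scan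
-- with a mutable current-entry accumulator; an alternative decomposition, same cost.

-- ===== PORT A =====
-- the header test 'l.startswith("Perforce server ") and l.endswith(":")'
def pvHdr (l : String) : Bool :=
  PySem.Str.startswith l "Perforce server " && PySem.Str.endswith l ":"

def gen_log_entries (lines : List String) : List (List String) :=
  let st := lines.foldl (fun (st : List (List String) × List String) l =>
    -- 'if header: (if e: yield e); e = []' then 'e.append(l)'
    let st := if pvHdr l then
        (if st.2 ≠ [] then (st.1 ++ [st.2], ([] : List String)) else (st.1, []))
      else st
    (st.1, st.2 ++ [l])) ([], [])
  st.1 ++ [st.2]      -- final 'yield e'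

-- ===== PORT B =====
-- 'next((i for i in range(1, len(seg)) if header(seg[i])), None)' is the first index ≥ 1
-- carrying a header, i.e. seg.tail.findIdx? + 1; that index is in range, so the Python
-- slices seg[:nxt] / seg[nxt:] are exactly take / drop. The while-loop becomes recursion
-- on the (strictly shorter) remaining suffix.
def gen_log_entries_alt (seg : List String) : List (List String) :=
  match h : seg.tail.findIdx?
      (fun l => PySem.Str.startswith l "Perforce server " && PySem.Str.endswith l ":") with
  | none => [seg]
  | some j => seg.take (j + 1) :: gen_log_entries_alt (seg.drop (j + 1))
termination_by seg.length
decreasing_by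
  have hj := List.findIdx?_eq_some_iff_findIdx_eq.mp h
  have hlen : j < seg.tail.length := hj.1
  have : 0 < seg.length := by
    cases seg with
    | nil => simp at hlen
    | cons a t => simp
  simp [List.length_drop]
  omega

-- ===== PRECONDITION & SPEC =====
def Spec_gen_log_entries (lines : List String) (out : List (List String)) : Prop := out = gen_log_entries_alt lines
instance (lines : List String) (out : List (List String)) : Decidable (Spec_gen_log_entries lines out) := by unfold Spec_gen_log_entries; infer_instance

-- ===== CLAIM (what is proved, stated in full; the proofs are below) =====
def Claim_equal_gen_log_entries : Prop := ∀ (lines : List String), Dom_gen_log_entries lines → Spec_gen_log_entries lines (gen_log_entries lines)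

-- ===== LEMMAS AND PROOFS =====

-- recursive characterisation of A's grouping (proof device only)
def pvGo (cur : List String) : List String → List (List String)
  | [] => [cur]
  | l :: ls => if pvHdr l = true ∧ cur ≠ [] then cur :: pvGo [l] ls else pvGo (cur ++ [l]) ls

def pvStepA (st : List (List String) × List String) (l : String) :
    List (List String) × List String :=
  let st := if pvHdr l then
      (if st.2 ≠ [] then (st.1 ++ [st.2], ([] : List String)) else (st.1, []))
    else st
  (st.1, st.2 ++ [l])

theorem pvA_go : ∀ (ls : List String) (out : List (List String)) (e : List String),
    (ls.foldl pvStepA (out, e)).1 ++ [(ls.foldl pvStepA (out, e)).2] = out ++ pvGo e ls := by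
  intro ls
  induction ls with
  | nil => intro out e; simp [pvGo]
  | cons l ls ih =>
    intro out e
    simp only [List.foldl_cons, pvGo]
    by_cases h : pvHdr l = true
    · by_cases he : e = []
      · subst he
        simp [pvStepA, h, ih]
      · have : pvStepA (out, e) l = (out ++ [e], [] ++ [l]) := by
          simp [pvStepA, h, he]
        rw [this, ih]
        simp [h, he]
    · have : pvStepA (out, e) l = (out, e ++ [l]) := by simp [pvStepA, h]
      rw [this, ih]
      simp [h]

-- unfolding lemmas for B's port (its match carries an equation binder, so rewrite via these;
-- the anonymous predicate in the port is definitionally pvHdr)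
theorem alt_none {seg : List String} (h : seg.tail.findIdx? pvHdr = none) :
    gen_log_entries_alt seg = [seg] := by
  rw [gen_log_entries_alt.eq_def]
  split
  · rfl
  · next j h' =>
    have h'' : seg.tail.findIdx? pvHdr = some j := h'
    rw [h''] at h; cases h

theorem alt_some {seg : List String} {j : Nat} (h : seg.tail.findIdx? pvHdr = some j) :
    gen_log_entries_alt seg = seg.take (j + 1) :: gen_log_entries_alt (seg.drop (j + 1)) := by
  rw [gen_log_entries_alt.eq_def]
  split
  · next h' =>
    have h'' : seg.tail.findIdx? pvHdr = none := h'
    rw [h''] at h; cases h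
  · next j' h' =>
    have h'' : seg.tail.findIdx? pvHdr = some j' := h'
    rw [h''] at h
    cases h
    rfl

-- core invariant: pvGo on an accumulator whose tail carries no header is pvSplit of the whole
theorem pvGo_alt : ∀ (ls cur : List String), cur ≠ [] →
    (∀ x ∈ cur.tail, pvHdr x = false) →
    pvGo cur ls = gen_log_entries_alt (cur ++ ls) := by
  intro ls
  induction ls with
  | nil =>
    intro cur hc hclean
    have hfind : (cur ++ []).tail.findIdx? pvHdr = none := by
      simpa using List.findIdx?_eq_none_iff.mpr hclean
    rw [alt_none hfind]
    simp [pvGo]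
  | cons l ls ih =>
    intro cur hc hclean
    by_cases h : pvHdr l = true
    · -- header: A closes cur; B finds the cut at index cur.length
      obtain ⟨c, cs, rfl⟩ : ∃ c cs, cur = c :: cs := by
        cases cur with
        | nil => exact absurd rfl hc
        | cons c cs => exact ⟨c, cs, rfl⟩
      have hcs : cs.findIdx? pvHdr = none :=
        List.findIdx?_eq_none_iff.mpr (by simpa using hclean)
      have hfind : ((c :: cs) ++ l :: ls).tail.findIdx? pvHdr = some cs.length := by
        simp only [List.cons_append, List.tail_cons, List.findIdx?_append, hcs,
          Option.none_or]
        simp [List.findIdx?_cons, h]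
      rw [alt_some hfind]
      have htake : ((c :: cs) ++ l :: ls).take (cs.length + 1) = c :: cs := by simp
      have hdrop : ((c :: cs) ++ l :: ls).drop (cs.length + 1) = l :: ls := by simp
      have hih := ih [l] (by simp) (by simp)
      simp only [List.singleton_append] at hih
      rw [htake, hdrop, ← hih]
      simp [pvGo, h, hc]
    · -- not a header: A extends cur; same whole list, clean tail extended
      have h1 : pvGo cur (l :: ls) = pvGo (cur ++ [l]) ls := by simp [pvGo, h]
      rw [h1, ih (cur ++ [l]) (by simp) ?_]
      · simp
      · intro x hx
        rcases cur with _ | ⟨c, cs⟩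
        · exact absurd rfl hc
        · simp at hx
          rcases hx with hx | rfl
          · exact hclean x (by simpa using hx)
          · exact eq_false_of_ne_true h

theorem pv_main (lines : List String) : gen_log_entries lines = gen_log_entries_alt lines := by
  have hA : gen_log_entries lines = pvGo [] lines := by
    show (List.foldl pvStepA ([], []) lines).1 ++ [(List.foldl pvStepA ([], []) lines).2] =
      pvGo [] lines
    exact pvA_go lines [] []
  rw [hA]
  cases lines with
  | nil =>
    rw [gen_log_entries_alt.eq_def]
    simp [pvGo]
  | cons l ls =>
    have h0 : pvGo [] (l :: ls) = pvGo [l] ls := by simp [pvGo]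
    rw [h0, pvGo_alt ls [l] (by simp) (by simp)]
    simp

-- ===== VERDICT (by name: the statement is the Claim_ definition above) =====
theorem gen_log_entries_spec : Claim_equal_gen_log_entries := by
  intro lines _
  unfold Spec_gen_log_entries
  exact pv_main lines
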